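-- pv_equiv track=rewrite | github.com/CharlotteMontanari/Licence-informatique | Licence2/I33/TP4.py | is_irreductible
-- ===== SOURCE A (Python) =====
-- def is_irreductible(P, p):
--     flag = True
--     i = 0
--     while i < p and flag:
--         v = P[0]
--         for el in range(1, len(P)):
--             v = (v * i + P[el]) % p
--         flag = (v != 0)
--         i += 1
--     return flag
-- ===== SOURCE B (Python) =====
-- def is_irreductible(P, p):
--     # Evaluate P(i) with ascending powers over the reversed coefficient list
--     # (power kept reduced mod p), then test divisibility by p once;
--     # early-return at the first root found.
--     for i in range(p):
--         total = 0
--         power = 1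
--         for c in reversed(P):
--             total += c * power
--             power = power * i % p
--         if total % p == 0:
--             return False
--     return True
-- ===== Notes on version B (the rewrite author's own statement) =====
-- stated objective: alternative
-- what changed: B replaces A's while/flag loop with Horner-with-intermediate-mods by a for-range with early return that evaluates P(i) exactly via ascending powers over the reversed coefficient list and reduces mod p once at the end.
-- intended difference: For a constant polynomial [c] with p>=1, c!=0 and p dividing c, A returns True because it never reduces the lone coefficient mod p, while B returns False, the intended answer since the polynomial is identically 0 mod p and so every residue is a root. — e.g. on is_irreductible([2], 2): A returns true, B returns false
import Mathlib
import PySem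

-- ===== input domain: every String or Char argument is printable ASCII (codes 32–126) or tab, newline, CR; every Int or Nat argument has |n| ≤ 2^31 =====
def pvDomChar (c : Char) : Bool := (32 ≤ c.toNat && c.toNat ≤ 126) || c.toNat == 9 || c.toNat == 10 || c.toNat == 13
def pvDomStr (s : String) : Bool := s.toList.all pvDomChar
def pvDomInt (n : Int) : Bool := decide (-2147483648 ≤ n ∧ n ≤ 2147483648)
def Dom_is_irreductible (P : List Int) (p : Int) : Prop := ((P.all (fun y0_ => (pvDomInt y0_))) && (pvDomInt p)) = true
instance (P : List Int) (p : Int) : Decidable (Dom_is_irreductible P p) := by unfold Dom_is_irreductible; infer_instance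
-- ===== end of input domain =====

-- B evaluates P(i) exactly (ascending powers over reversed P) and reduces mod p once,
-- with a for-range + early return instead of A's while/flag Horner-with-mods loop;
-- objective: alternative (same asymptotic cost, different algorithm).

-- ===== PORT A =====
-- v = P[0]; for el in range(1, len(P)): v = (v*i + P[el]) % p
def aHorner (P : List Int) (p i : Int) : Int :=
  (PySem.List.pyRange 1 (PySem.List.len P) 1).foldl
    (fun v el => PySem.Int.mod (v * i + PySem.List.pyGetD P el 0) p)
    (PySem.List.pyGetD P 0 0)

-- the while loop: fuel = p.toNat bounds the iteration count
def aLoop (P : List Int) (p : Int) : Nat → Int → Bool → Bool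
  | 0, _, flag => flag
  | f + 1, i, flag =>
      if i < p ∧ flag = true then aLoop P p f (i + 1) (decide (aHorner P p i ≠ 0))
      else flag

def is_irreductible (P : List Int) (p : Int) : Bool :=
  aLoop P p p.toNat 0 true

-- ===== PORT B =====
-- total = 0; power = 1; for c in reversed(P): total += c*power; power = power*i % p
def bEval (P : List Int) (p i : Int) : Int :=
  (P.reverse.foldl
    (fun s c => (s.1 + c * s.2, PySem.Int.mod (s.2 * i) p))
    ((0 : Int), (1 : Int))).1

-- for i in range(p): if total % p == 0: return False ... return True
-- range(p) is lazy in Python, so the loop is ported as a counter with p iterations left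
def bLoop (P : List Int) (p : Int) : Nat → Int → Bool
  | 0, _ => true
  | f + 1, i => if PySem.Int.mod (bEval P p i) p = 0 then false else bLoop P p f (i + 1)

def is_irreductible_alt (P : List Int) (p : Int) : Bool :=
  bLoop P p p.toNat 0

-- ===== PRECONDITION & SPEC =====
-- Pre_ excludes only the inputs where A raises IndexError: empty P with p ≥ 1 (P[0]).
def Pre_is_irreductible (P : List Int) (p : Int) : Prop := P ≠ [] ∨ p ≤ 0
instance (P : List Int) (p : Int) : Decidable (Pre_is_irreductible P p) := by
  unfold Pre_is_irreductible; infer_instance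
def pvWitness_is_irreductible : List Int × Int := ([1, 1], 2)

-- For P = [c] with p ≥ 1, c ≠ 0 and p ∣ c, A returns true (it never reduces the lone
-- coefficient mod p) while B returns false — the intended value, since P ≡ 0 mod p.
def D_is_irreductible (P : List Int) (p : Int) : Prop :=
  P.length = 1 ∧ 1 ≤ p ∧ P.headD 0 ≠ 0 ∧ PySem.Int.mod (P.headD 0) p = 0
instance (P : List Int) (p : Int) : Decidable (D_is_irreductible P p) := by
  unfold D_is_irreductible; infer_instance

def Spec_is_irreductible (P : List Int) (p : Int) (out : Bool) : Prop :=
  ¬ D_is_irreductible P p → out = is_irreductible_alt P p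
instance (P : List Int) (p : Int) (out : Bool) : Decidable (Spec_is_irreductible P p out) := by
  unfold Spec_is_irreductible; infer_instance

def pvDiffWitness_is_irreductible : List Int × Int := ([2], 2)
def pvDiffWitnessOut_is_irreductible : Bool × Bool := (true, false)

-- ===== CLAIM =====
def Claim_unchanged_is_irreductible : Prop := ∀ (P : List Int) (p : Int),
  Dom_is_irreductible P p → Pre_is_irreductible P p →
  Spec_is_irreductible P p (is_irreductible P p)
def Claim_changed_is_irreductible : Prop :=
  Dom_is_irreductible (pvDiffWitness_is_irreductible.1) (pvDiffWitness_is_irreductible.2) ∧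
  Pre_is_irreductible (pvDiffWitness_is_irreductible.1) (pvDiffWitness_is_irreductible.2) ∧
  D_is_irreductible (pvDiffWitness_is_irreductible.1) (pvDiffWitness_is_irreductible.2) ∧
  is_irreductible (pvDiffWitness_is_irreductible.1) (pvDiffWitness_is_irreductible.2) = pvDiffWitnessOut_is_irreductible.1 ∧
  is_irreductible_alt (pvDiffWitness_is_irreductible.1) (pvDiffWitness_is_irreductible.2) = pvDiffWitnessOut_is_irreductible.2 ∧
  pvDiffWitnessOut_is_irreductible.1 ≠ pvDiffWitnessOut_is_irreductible.2
def Claim_exact_is_irreductible : Prop := ∀ (P : List Int) (p : Int),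
  Dom_is_irreductible P p → Pre_is_irreductible P p → D_is_irreductible P p →
  is_irreductible P p ≠ is_irreductible_alt P p
-- ===== LEMMAS AND PROOFS =====

-- exact Horner fold
def hornerG (i : Int) (v : Int) (L : List Int) : Int :=
  L.foldl (fun w c => w * i + c) v

lemma hornerG_nil (i v : Int) : hornerG i v [] = v := rfl

lemma hornerG_cons (i v c : Int) (L : List Int) :
    hornerG i v (c :: L) = hornerG i (v * i + c) L := rfl

-- linearity: fold from v = v * i^len + fold from 0
lemma hornerG_shift (i : Int) (L : List Int) : ∀ v : Int,
    hornerG i v L = v * i ^ L.length + hornerG i 0 L := by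
  induction L with
  | nil => intro v; simp [hornerG_nil]
  | cons c L ih =>
      intro v
      rw [hornerG_cons, hornerG_cons, ih (v * i + c), ih (0 * i + c)]
      simp only [List.length_cons, pow_succ]
      ring

-- B's reversed ascending-powers fold computes the exact Horner value
lemma bfold (i : Int) (L : List Int) : ∀ t pw : Int,
    L.reverse.foldl (fun s c => (s.1 + c * s.2, s.2 * i)) (t, pw)
      = (t + pw * hornerG i 0 L, pw * i ^ L.length) := by
  induction L with
  | nil => intro t pw; simp [hornerG_nil]
  | cons c L ih =>
      intro t pw
      simp only [List.reverse_cons, List.foldl_append, ih t pw, List.foldl_cons,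
        List.foldl_nil, List.length_cons, Prod.mk.injEq]
      rw [hornerG_cons, hornerG_shift i L (0 * i + c)]
      constructor
      · ring
      · rw [pow_succ]; ring

-- the power-reduced fold agrees with the pure fold, mod p (p > 0)
lemma mpfold (p i : Int) (hp : 0 < p) (L : List Int) : ∀ t pw t' pw' : Int,
    t % p = t' % p → pw % p = pw' % p →
    (L.foldl (fun s c => (s.1 + c * s.2, PySem.Int.mod (s.2 * i) p)) (t, pw)).1 % p
      = (L.foldl (fun s c => (s.1 + c * s.2, s.2 * i)) (t', pw')).1 % p := by
  induction L with
  | nil => intro t pw t' pw' ht _; exact ht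
  | cons c L ih =>
      intro t pw t' pw' ht hpw
      simp only [List.foldl_cons]
      apply ih
      · conv_lhs => rw [Int.add_emod, Int.mul_emod, ht, hpw, ← Int.mul_emod, ← Int.add_emod]
      · rw [PySem.Int.mod_eq_emod_of_pos hp, Int.emod_emod_of_dvd _ dvd_rfl,
          Int.mul_emod, hpw, ← Int.mul_emod]

lemma bEval_mod (P : List Int) (p i : Int) (hp : 0 < p) :
    PySem.Int.mod (bEval P p i) p = hornerG i 0 P % p := by
  unfold bEval
  rw [PySem.Int.mod_eq_emod_of_pos hp, mpfold p i hp P.reverse 0 1 0 1 rfl rfl, bfold]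
  norm_num

-- A's inner fold with intermediate mods equals the exact fold reduced once (p > 0)
lemma modfold (p i : Int) (hp : 0 < p) (L : List Int) : ∀ a b : Int, L ≠ [] →
    a % p = b % p →
    L.foldl (fun v c => PySem.Int.mod (v * i + c) p) a = (hornerG i b L) % p := by
  induction L with
  | nil => intro a b h; exact absurd rfl h
  | cons c L ih =>
      intro a b _ hab
      rw [List.foldl_cons, hornerG_cons]
      cases L with
      | nil =>
          simp only [List.foldl_nil, hornerG_nil]
          rw [PySem.Int.mod_eq_emod_of_pos hp]
          conv_lhs => rw [Int.add_emod, Int.mul_emod, hab, ← Int.mul_emod, ← Int.add_emod]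
      | cons d L' =>
          apply ih _ _ (by simp)
          rw [PySem.Int.mod_eq_emod_of_pos hp, Int.emod_emod_of_dvd _ dvd_rfl]
          conv_lhs => rw [Int.add_emod, Int.mul_emod, hab, ← Int.mul_emod, ← Int.add_emod]

lemma aHorner_eq (P : List Int) (p i : Int) (hp : 0 < p) (c : Int) (rest : List Int)
    (hP : P = c :: rest) :
    aHorner P p i = if rest = [] then c else (hornerG i c rest) % p := by
  subst hP
  unfold aHorner
  rw [PySem.List.foldl_pyRange_pyGetD (c :: rest) 0
      (fun v x => PySem.Int.mod (v * i + x) p) (PySem.List.pyGetD (c :: rest) 0 0)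
      (by omega : (0:Int) ≤ 1)]
  have h0 : PySem.List.pyGetD (c :: rest) 0 0 = c := by
    simp [PySem.List.pyGetD_zero_cons]
  rw [h0]
  have hdrop : List.drop (1:Int).toNat (c :: rest) = rest := by simp
  rw [hdrop]
  cases hrest : rest with
  | nil => simp
  | cons d L =>
      rw [if_neg (by simp)]
      exact modfold p i hp (d :: L) c c (by simp) rfl

-- the per-iteration tests agree outside D_
lemma test_eq (P : List Int) (p i : Int) (hp : 0 < p) (hne : P ≠ [])
    (hD : ¬ D_is_irreductible P p) :
    decide (aHorner P p i ≠ 0) = ! decide (PySem.Int.mod (bEval P p i) p = 0) := by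
  obtain ⟨c, rest, rfl⟩ : ∃ c rest, P = c :: rest := by
    cases P with
    | nil => exact absurd rfl hne
    | cons c rest => exact ⟨c, rest, rfl⟩
  rw [aHorner_eq (c :: rest) p i hp c rest rfl, bEval_mod (c :: rest) p i hp]
  have hmod : hornerG i 0 (c :: rest) % p = (hornerG i c rest) % p := by
    rw [hornerG_cons]
    norm_num
  rw [hmod]
  cases hrest : rest with
  | cons d L => rw [if_neg (by simp)]; simp
  | nil =>
      rw [if_pos rfl, hornerG_nil]
      by_cases hc : c = 0
      · subst hc
        simp
      · have hm : c % p ≠ 0 := by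
          intro h
          exact hD ⟨by simp [hrest], by omega, by simpa using hc,
            by rw [List.headD_cons, PySem.Int.mod_eq_emod_of_pos hp]; exact h⟩
        simp [hc, hm]

lemma aLoop_false (P : List Int) (p : Int) : ∀ f i, aLoop P p f i false = false := by
  intro f i
  cases f with
  | zero => rfl
  | succ f => simp [aLoop]

lemma loop_eq (P : List Int) (p : Int)
    (htest : ∀ j, decide (aHorner P p j ≠ 0) = ! decide (PySem.Int.mod (bEval P p j) p = 0)) :
    ∀ f (i : Int), 0 ≤ i → f = (p - i).toNat →
    aLoop P p f i true = bLoop P p f i := by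
  intro f
  induction f with
  | zero => intro i _ _; rfl
  | succ f ih =>
      intro i hi hf
      have hip : i < p := by omega
      show (if i < p ∧ true = true then aLoop P p f (i + 1) (decide (aHorner P p i ≠ 0))
            else true)
          = if PySem.Int.mod (bEval P p i) p = 0 then false else bLoop P p f (i + 1)
      rw [if_pos ⟨hip, rfl⟩]
      by_cases hz : PySem.Int.mod (bEval P p i) p = 0
      · have h1 : decide (aHorner P p i ≠ 0) = false := by rw [htest i]; simp [hz]
        rw [h1, if_pos hz, aLoop_false]
      · have h1 : decide (aHorner P p i ≠ 0) = true := by rw [htest i]; simp [hz]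
        rw [h1, if_neg hz]
        exact ih (i + 1) (by omega) (by omega)

-- inside D_ the A-side test is constantly true, so A's loop returns true
lemma aLoop_const_true (P : List Int) (p : Int)
    (htest : ∀ j, decide (aHorner P p j ≠ 0) = true) :
    ∀ f i, aLoop P p f i true = true := by
  intro f
  induction f with
  | zero => intro i; rfl
  | succ f ih =>
      intro i
      show (if i < p ∧ true = true then aLoop P p f (i + 1) (decide (aHorner P p i ≠ 0))
            else true) = true
      by_cases hip : i < p
      · rw [if_pos ⟨hip, rfl⟩, htest i]
        exact ih (i + 1)
      · rw [if_neg (by simp [hip])]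

-- ===== VERDICT =====
theorem is_irreductible_spec : Claim_unchanged_is_irreductible := by
  intro P p _ hpre hD
  unfold is_irreductible is_irreductible_alt
  by_cases hp : 0 < p
  · have hne : P ≠ [] := by
      cases hpre with
      | inl h => exact h
      | inr h => omega
    exact loop_eq P p (fun j => test_eq P p j hp hne hD) p.toNat 0 (by omega) (by omega)
  · have h0 : p.toNat = 0 := by omega
    rw [h0]
    rfl

theorem is_irreductible_changed : Claim_changed_is_irreductible := by
  unfold Claim_changed_is_irreductible; decide

theorem is_irreductible_tight : Claim_exact_is_irreductible := by
  intro P p _ _ hD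
  obtain ⟨hlen, hp, hc, hm⟩ := hD
  obtain ⟨c, rfl⟩ : ∃ c, P = [c] := by
    cases P with
    | nil => simp at hlen
    | cons c rest =>
        cases rest with
        | nil => exact ⟨c, rfl⟩
        | cons d L => simp at hlen
  simp only [List.headD_cons] at hc hm
  have hA : is_irreductible [c] p = true := by
    unfold is_irreductible
    apply aLoop_const_true
    intro j
    rw [aHorner_eq [c] p j hp c [] rfl]
    simp [hc]
  have hB : is_irreductible_alt [c] p = false := by
    unfold is_irreductible_alt
    obtain ⟨f, hf⟩ : ∃ f, p.toNat = f + 1 := ⟨p.toNat - 1, by omega⟩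
    rw [hf]
    show (if PySem.Int.mod (bEval [c] p 0) p = 0 then false else bLoop [c] p f 1) = false
    have hc0 : PySem.Int.mod (bEval [c] p 0) p = 0 := by
      have : bEval [c] p 0 = c := by
        show (0 + c * 1, PySem.Int.mod (1 * 0) p).1 = c
        norm_num
      rw [this, hm]
    rw [if_pos hc0]
  rw [hA, hB]
  simp
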